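-- pv_equiv track=rewrite | github.com/qwl2333/leetcode-py3 | Companies/Amazon/OA/find_review_score.py | find_review_score
-- ===== SOURCE A (Python) =====
-- def find_review_score(review: str, prohibited_words: list[str]) -> int:
--     review = review.lower()
--     l, r = 0, 0
--     n = len(review)
--
--     def not_include_prohibited_words(substr: str) -> bool:
--         for w in prohibited_words:
--             if w in substr:
--                 return False
--
--         return True
--
--     score = 0
--     while r < n:
--         substr = review[l : r + 1]
--         if not_include_prohibited_words(substr):
--             score = max(score, r - l + 1)
--             r += 1
--         else:
--             while not not_include_prohibited_words(review[l : r + 1]):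
--                 l += 1
--
--     return score
-- ===== SOURCE B (Python) =====
-- def find_review_score(review: str, prohibited_words: list[str]) -> int:
--     # One left-to-right pass: hash the prohibited words once; at each position r check,
--     # per distinct word length only, whether a prohibited word ends at r, and push the
--     # window's left bound past its start; best window ends at each r.
--     review = review.lower()
--     n = len(review)
--     words = set(prohibited_words)
--     lengths = sorted({len(w) for w in words})
--     l = 0
--     score = 0
--     for r in range(n):
--         for L in lengths:
--             if L <= r + 1 and review[r + 1 - L: r + 1] in words:
--                 l = max(l, r + 2 - L)
--         score = max(score, r - l + 1)
--     return score
-- ===== Notes on version B (the rewrite author's own statement) =====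
-- stated objective: faster
-- what changed: A grows/shrinks a window and rescans the whole current window for every prohibited word at each step; B hashes the prohibited words once and makes a single left-to-right pass with one set lookup per distinct word length per position, pushing the window's left bound past the start of any prohibited word ending there.
import Mathlib
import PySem

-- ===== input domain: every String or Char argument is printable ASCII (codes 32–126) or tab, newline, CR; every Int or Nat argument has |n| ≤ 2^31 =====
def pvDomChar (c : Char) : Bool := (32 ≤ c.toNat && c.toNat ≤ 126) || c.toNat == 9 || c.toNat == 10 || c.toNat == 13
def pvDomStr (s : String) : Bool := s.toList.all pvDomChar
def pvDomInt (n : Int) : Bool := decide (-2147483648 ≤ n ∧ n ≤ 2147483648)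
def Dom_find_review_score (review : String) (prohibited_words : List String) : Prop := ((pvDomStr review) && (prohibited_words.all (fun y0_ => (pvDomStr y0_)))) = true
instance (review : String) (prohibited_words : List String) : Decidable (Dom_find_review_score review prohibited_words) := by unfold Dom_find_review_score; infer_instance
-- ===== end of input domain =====

-- B replaces A's quadratic grow-and-shrink window (which re-scans the whole window for every
-- prohibited word at every step) by a single left-to-right pass: the prohibited words are
-- hashed once, and at each position r one lookup per DISTINCT word length decides whether a
-- prohibited word ends at r, pushing the window's left bound past its start.

-- ===== PORT A =====
-- A's helper `not_include_prohibited_words`: for-loop with early return False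
def pvNotIncl (prohibited_words : List String) (substr : String) : Bool :=
  match prohibited_words with
  | [] => true
  | w :: rest => if PySem.Str.isIn w substr then false else pvNotIncl rest substr

-- A's inner `while not not_include_prohibited_words(review[l:r+1]): l += 1`.
-- The `r + 1 ≤ l` guard only makes the recursion total: under Pre_ (no empty prohibited
-- word) Python's own check on the then-empty slice succeeds and exits with the same l.
def pvInnerA (rev : String) (ws : List String) (r l : Int) : Int :=
  if r + 1 ≤ l then l
  else if pvNotIncl ws (PySem.Str.slice rev (some l) (some (r + 1))) then l
  else pvInnerA rev ws r (l + 1)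
termination_by (r + 1 - l).toNat
decreasing_by omega

theorem pvInnerA_ge (rev : String) (ws : List String) (r l : Int) : l ≤ pvInnerA rev ws r l := by
  rw [pvInnerA]
  split_ifs with h1 h2
  · omega
  · omega
  · have := pvInnerA_ge rev ws r (l + 1)
    omega
termination_by (r + 1 - l).toNat
decreasing_by omega

-- A's outer `while r < n` loop.  The `r + 1 ≤ l` guard only makes the recursion total:
-- under Pre_ a dirty empty window is impossible, so it is never reached.
def pvOuterA (rev : String) (ws : List String) (n l r score : Int) : Int :=
  if n ≤ r then score
  else if pvNotIncl ws (PySem.Str.slice rev (some l) (some (r + 1))) then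
    pvOuterA rev ws n l (r + 1) (max score (r - l + 1))
  else if r + 1 ≤ l then score
  else pvOuterA rev ws n (pvInnerA rev ws r l) r score
termination_by ((n - r).toNat, (r + 1 - l).toNat)
decreasing_by
  · exact Prod.Lex.left _ _ (by omega)
  · have h1 : l + 1 ≤ pvInnerA rev ws r l := by
      rw [pvInnerA]
      have hng : ¬ (r + 1 ≤ l) := by omega
      simp only [*, if_false]
      exact pvInnerA_ge rev ws r (l + 1)
    exact Prod.Lex.right _ (by omega)

def find_review_score (review : String) (prohibited_words : List String) : Int :=
  let rev := PySem.Str.lower review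
  let n := PySem.Str.len rev
  pvOuterA rev prohibited_words n 0 0 0

-- ===== PORT B =====
def find_review_score_alt (review : String) (prohibited_words : List String) : Int :=
  let rev := PySem.Str.lower review
  let n := PySem.Str.len rev
  let words : PySem.Set String := PySem.Set.ofList prohibited_words
  let lengths : List Int := PySem.List.sorted (PySem.Set.ofList (List.map PySem.Str.len words)) (fun x => x)
  let res := (PySem.List.pyRange 0 n 1).foldl (fun (st : Int × Int) r =>
    let l := lengths.foldl (fun l L =>
      if L ≤ r + 1 ∧
         PySem.Set.contains words (PySem.Str.slice rev (some (r + 1 - L)) (some (r + 1))) = true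
      then max l (r + 2 - L) else l) st.1
    (l, max st.2 (r - l + 1))) (0, 0)
  res.2

-- ===== PRECONDITION & SPEC =====
-- Pre_ excludes nonempty reviews together with an empty prohibited word "", on which A's
-- inner while-loop never terminates (every substring contains ""); B returns 0 there.
def Pre_find_review_score (review : String) (prohibited_words : List String) : Prop :=
  review = "" ∨ "" ∉ prohibited_words
instance (review : String) (prohibited_words : List String) : Decidable (Pre_find_review_score review prohibited_words) := by unfold Pre_find_review_score; infer_instance

def pvWitness_find_review_score : String × List String := ("This bed is very Bad", ["bad", "poor"])

def Spec_find_review_score (review : String) (prohibited_words : List String) (out : Int) : Prop := out = find_review_score_alt review prohibited_words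
instance (review : String) (prohibited_words : List String) (out : Int) : Decidable (Spec_find_review_score review prohibited_words out) := by unfold Spec_find_review_score; infer_instance

-- ===== CLAIM (what is proved, stated in full; the proofs are below) =====
def Claim_equal_find_review_score : Prop := ∀ (review : String) (prohibited_words : List String), Dom_find_review_score review prohibited_words → Pre_find_review_score review prohibited_words → Spec_find_review_score review prohibited_words (find_review_score review prohibited_words)

-- ===== LEMMAS AND PROOFS =====

-- Reference quantities, on the lowered character list cs.
-- pvBnd cs ws r : one plus the largest start of a prohibited-word occurrence ENDING at index r (0 if none).
def pvBnd (cs : List Char) (ws : List String) (r : Nat) : Nat :=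
  ws.foldl (fun b w =>
    if w.toList.length ≤ r + 1 ∧ w.toList <+: cs.drop (r + 1 - w.toList.length)
    then max b (r + 2 - w.toList.length) else b) 0

-- pvL cs ws r : minimal clean left bound for windows ending before index r
def pvL (cs : List Char) (ws : List String) : Nat → Nat
  | 0 => 0
  | r + 1 => max (pvL cs ws r) (pvBnd cs ws r)

-- pvRef cs ws r : the best score over windows ending before index r
def pvRef (cs : List Char) (ws : List String) : Nat → Nat
  | 0 => 0
  | r + 1 => max (pvRef cs ws r) (r + 1 - pvL cs ws (r + 1))

-- infix of a slice = an occurrence inside the index window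
theorem pv_infix_iff (w s : List Char) : w <:+: s ↔ ∃ j, w <+: s.drop j :=
  ((PySem.Chars.exists_prefix_drop_iff_isIn w s).trans (PySem.Chars.isIn_iff_infix w s)).symm

theorem pv_infix_drop_take_iff (cs w : List Char) (l k : Nat) :
    w <:+: (cs.drop l).take k ↔ ∃ j, l ≤ j ∧ j + w.length ≤ l + k ∧ w <+: cs.drop j := by
  rcases eq_or_ne w [] with rfl | hw
  · constructor
    · intro _; exact ⟨l, le_rfl, by simp, List.nil_prefix⟩
    · intro _; exact List.nil_infix
  · rw [pv_infix_iff]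
    constructor
    · rintro ⟨i, hi⟩
      rw [List.drop_take, List.drop_drop] at hi
      rcases List.prefix_take_iff.1 hi with ⟨hp, hlen⟩
      have hwpos : 0 < w.length := List.length_pos_iff.2 hw
      exact ⟨l + i, by omega, by omega, hp⟩
    · rintro ⟨j, hlj, hjk, hp⟩
      refine ⟨j - l, ?_⟩
      rw [List.drop_take, List.drop_drop]
      refine List.prefix_take_iff.2 ⟨?_, by omega⟩
      have hx : l + (j - l) = j := by omega
      rwa [hx]

theorem pvNotIncl_iff (ws : List String) (s : String) :
    pvNotIncl ws s = true ↔ ∀ w ∈ ws, ¬ w.toList <:+: s.toList := by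
  induction ws with
  | nil => simp [pvNotIncl]
  | cons w rest ih =>
    rw [pvNotIncl]
    by_cases h : PySem.Str.isIn w s = true
    · have h3 : PySem.Chars.isIn w.toList s.toList = true := by simpa using h
      simp [h3, (PySem.Str.isIn_iff_infix w s).1 h]
    · have h2 : ¬ w.toList <:+: s.toList := fun hi => h ((PySem.Str.isIn_iff_infix w s).2 hi)
      have h4 : PySem.Chars.isIn w.toList s.toList = false := (PySem.Chars.isIn_eq_false_iff _ _).2 h2
      simp [ih, h2, h4]

-- the clean test A performs, characterised as "no occurrence inside [l, r]"
theorem pv_clean_iff (rev : String) (ws : List String) (l r : Nat) (hlr : l ≤ r + 1) :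
    pvNotIncl ws (PySem.Str.slice rev (some (l : Int)) (some ((r : Int) + 1))) = true ↔
      ∀ w ∈ ws, ∀ j, l ≤ j → j + w.toList.length ≤ r + 1 → ¬ w.toList <+: rev.toList.drop j := by
  rw [pvNotIncl_iff]
  have hcast : ((r : Int) + 1) = ((r + 1 : Nat) : Int) := by omega
  have hsl : (PySem.Str.slice rev (some (l : Int)) (some ((r : Int) + 1))).toList
      = (rev.toList.drop l).take (r + 1 - l) := by
    rw [hcast, PySem.Str.toList_slice, PySem.Chars.slice_eq_listSlice, PySem.List.slice_natCast]
  rw [hsl]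
  constructor
  · intro h w hwmem j hlj hjr hp
    exact h w hwmem ((pv_infix_drop_take_iff _ _ _ _).2 ⟨j, hlj, by omega, hp⟩)
  · intro h w hwmem hinf
    rcases (pv_infix_drop_take_iff _ _ _ _).1 hinf with ⟨j, hlj, hjk, hp⟩
    exact h w hwmem j hlj (by omega) hp

theorem pv_foldl_max_le_iff {A B : Type} [LinearOrder B] (xs : List A) (P : A → Prop)
    [DecidablePred P] (f : A → B) (b0 l : B) :
    xs.foldl (fun b w => if P w then max b (f w) else b) b0 ≤ l ↔
      b0 ≤ l ∧ ∀ w ∈ xs, P w → f w ≤ l := by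
  induction xs generalizing b0 with
  | nil => simp
  | cons w rest ih =>
    rw [List.foldl_cons]
    by_cases h : P w
    · rw [if_pos h, ih]
      constructor
      · rintro ⟨hb, hrest⟩
        rcases max_le_iff.1 hb with ⟨h1, h2⟩
        refine ⟨h1, fun v hv hPv => ?_⟩
        rcases List.mem_cons.1 hv with rfl | hv
        · exact h2
        · exact hrest v hv hPv
      · rintro ⟨hb, hall⟩
        exact ⟨max_le_iff.2 ⟨hb, hall w List.mem_cons_self h⟩,
          fun v hv hPv => hall v (List.mem_cons_of_mem _ hv) hPv⟩
    · rw [if_neg h, ih]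
      constructor
      · rintro ⟨hb, hrest⟩
        refine ⟨hb, fun v hv hPv => ?_⟩
        rcases List.mem_cons.1 hv with rfl | hv
        · exact absurd hPv h
        · exact hrest v hv hPv
      · rintro ⟨hb, hall⟩
        exact ⟨hb, fun v hv hPv => hall v (List.mem_cons_of_mem _ hv) hPv⟩

theorem pvBnd_le_iff (cs : List Char) (ws : List String) (r l : Nat) :
    pvBnd cs ws r ≤ l ↔
      ∀ w ∈ ws, w.toList.length ≤ r + 1 → w.toList <+: cs.drop (r + 1 - w.toList.length) →
        r + 2 - w.toList.length ≤ l := by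
  unfold pvBnd
  rw [pv_foldl_max_le_iff ws
    (fun w => w.toList.length ≤ r + 1 ∧ w.toList <+: cs.drop (r + 1 - w.toList.length))
    (fun w => r + 2 - w.toList.length) 0 l]
  constructor
  · rintro ⟨-, h⟩ w hw h1 h2
    exact h w hw ⟨h1, h2⟩
  · intro h
    exact ⟨Nat.zero_le _, fun w hw hP => h w hw hP.1 hP.2⟩

theorem pvL_le (cs : List Char) (ws : List String) (hw : ∀ w ∈ ws, w.toList ≠ []) :
    ∀ r, pvL cs ws r ≤ r
  | 0 => le_rfl
  | r + 1 => by
    rw [pvL]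
    have h1 := pvL_le cs ws hw r
    have h2 : pvBnd cs ws r ≤ r + 1 := by
      rw [pvBnd_le_iff]
      intro w hwmem _ _
      have : w.toList.length ≠ 0 := fun h => hw w hwmem (List.length_eq_zero_iff.1 h)
      omega
    omega

theorem pvL_succ_le_iff (cs : List Char) (ws : List String) (hw : ∀ w ∈ ws, w.toList ≠ []) :
    ∀ r l, pvL cs ws (r + 1) ≤ l ↔
      ∀ w ∈ ws, ∀ j, l ≤ j → j + w.toList.length ≤ r + 1 → ¬ w.toList <+: cs.drop j := by
  intro r
  induction r with
  | zero =>
    intro l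
    show max (pvL cs ws 0) (pvBnd cs ws 0) ≤ l ↔ _
    have h0 : pvL cs ws 0 = 0 := rfl
    rw [h0]
    rw [Nat.max_le]
    constructor
    · rintro ⟨-, hb⟩
      rw [pvBnd_le_iff] at hb
      intro w hwm j hlj hjw hp
      have hpos : w.toList.length ≠ 0 := fun h => hw w hwm (List.length_eq_zero_iff.1 h)
      have h1 : w.toList.length = 1 := by omega
      have hj0 : j = 0 := by omega
      subst hj0
      have := hb w hwm (by omega) (by rw [show 1 - w.toList.length = 0 by omega]; exact hp)
      omega
    · intro h
      refine ⟨Nat.zero_le _, ?_⟩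
      rw [pvBnd_le_iff]
      intro w hwm h1 hp
      have hpos : w.toList.length ≠ 0 := fun hh => hw w hwm (List.length_eq_zero_iff.1 hh)
      have hlen : w.toList.length = 1 := by omega
      by_contra hcon
      have hl0 : l = 0 := by omega
      exact h w hwm 0 (by omega) (by omega)
        (by rw [show (0:Nat) = 1 - w.toList.length by omega]; exact hp)
  | succ r ih =>
    intro l
    show max (pvL cs ws (r + 1)) (pvBnd cs ws (r + 1)) ≤ l ↔ _
    rw [Nat.max_le, ih l, pvBnd_le_iff]
    constructor
    · rintro ⟨hclean, hb⟩ w hwm j hlj hjw hp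
      by_cases hcase : j + w.toList.length ≤ r + 1
      · exact hclean w hwm j hlj hcase hp
      · have hpos : w.toList.length ≠ 0 := fun hh => hw w hwm (List.length_eq_zero_iff.1 hh)
        have hj : j = r + 2 - w.toList.length := by omega
        have := hb w hwm (by omega) (by rw [← hj]; exact hp)
        omega
    · intro h
      constructor
      · intro w hwm j hlj hjw hp
        exact h w hwm j hlj (by omega) hp
      · intro w hwm h1 hp
        by_contra hcon
        have hpos : w.toList.length ≠ 0 := fun hh => hw w hwm (List.length_eq_zero_iff.1 hh)
        exact h w hwm (r + 2 - w.toList.length) (by omega) (by omega) hp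

-- the Boolean clean test, characterised by pvL
theorem pv_cleanb_iff (rev : String) (ws : List String) (hw : ∀ w ∈ ws, w.toList ≠ [])
    (l r : Nat) (hlr : l ≤ r + 1) :
    pvNotIncl ws (PySem.Str.slice rev (some (l : Int)) (some ((r : Int) + 1))) = true ↔
      pvL rev.toList ws (r + 1) ≤ l :=
  (pv_clean_iff rev ws l r hlr).trans (pvL_succ_le_iff rev.toList ws hw r l).symm

theorem pvL_mono (cs : List Char) (ws : List String) (r : Nat) :
    pvL cs ws r ≤ pvL cs ws (r + 1) := Nat.le_max_left _ _

theorem pvInnerA_eq (rev : String) (ws : List String) (hw : ∀ w ∈ ws, w.toList ≠ [])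
    (r : Nat) : ∀ d l, pvL rev.toList ws (r + 1) - l = d → l ≤ pvL rev.toList ws (r + 1) →
      pvInnerA rev ws (r : Int) (l : Int) = (pvL rev.toList ws (r + 1) : Int) := by
  intro d
  induction d with
  | zero =>
    intro l hd hle
    have hEq : l = pvL rev.toList ws (r + 1) := by omega
    rw [pvInnerA]
    by_cases hg : (r : Int) + 1 ≤ (l : Int)
    · have hl : l ≤ r + 1 := by
        have := pvL_le rev.toList ws hw (r + 1)
        omega
      rw [if_pos hg, hEq]
    · rw [if_neg hg]
      have hcl : pvNotIncl ws (PySem.Str.slice rev (some (l : Int)) (some ((r : Int) + 1))) = true := by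
        rw [pv_cleanb_iff rev ws hw l r (by omega)]
        omega
      rw [if_pos hcl, hEq]
  | succ d ihd =>
    intro l hd hle
    have hlt : l < pvL rev.toList ws (r + 1) := by omega
    have hlr1 : pvL rev.toList ws (r + 1) ≤ r + 1 := pvL_le rev.toList ws hw (r + 1)
    rw [pvInnerA]
    have hg : ¬ ((r : Int) + 1 ≤ (l : Int)) := by omega
    rw [if_neg hg]
    have hcl : ¬ pvNotIncl ws (PySem.Str.slice rev (some (l : Int)) (some ((r : Int) + 1))) = true := by
      rw [pv_cleanb_iff rev ws hw l r (by omega)]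
      omega
    rw [if_neg hcl]
    have hcast : (l : Int) + 1 = ((l + 1 : Nat) : Int) := by omega
    rw [hcast]
    exact ihd (l + 1) (by omega) (by omega)

theorem pv_max_cast (a b r : Nat) :
    max (a : Int) ((r : Int) - (b : Int) + 1) = ((max a (r + 1 - b) : Nat) : Int) := by
  omega

theorem pvOuterA_step_clean (rev : String) (ws : List String) (hw : ∀ w ∈ ws, w.toList ≠ [])
    (n r : Nat) (hrn : r < n) (score : Int) :
    pvOuterA rev ws (n : Int) (pvL rev.toList ws (r + 1) : Int) (r : Int) score =
      pvOuterA rev ws (n : Int) (pvL rev.toList ws (r + 1) : Int) ((r + 1 : Nat) : Int)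
        (max score ((r : Int) - (pvL rev.toList ws (r + 1) : Int) + 1)) := by
  rw [pvOuterA]
  have hg : ¬ ((n : Int) ≤ (r : Int)) := by omega
  rw [if_neg hg]
  have hlr1 : pvL rev.toList ws (r + 1) ≤ r + 1 := pvL_le rev.toList ws hw (r + 1)
  have hcl : pvNotIncl ws (PySem.Str.slice rev (some (pvL rev.toList ws (r + 1) : Int))
      (some ((r : Int) + 1))) = true := by
    rw [pv_cleanb_iff rev ws hw _ r (by omega)]
  rw [if_pos hcl]
  have hcast : (r : Int) + 1 = ((r + 1 : Nat) : Int) := by omega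
  rw [hcast]

theorem pvOuterA_step (rev : String) (ws : List String) (hw : ∀ w ∈ ws, w.toList ≠ [])
    (n r : Nat) (hrn : r < n) (score : Int) (l : Nat) (hl : l ≤ pvL rev.toList ws (r + 1)) :
    pvOuterA rev ws (n : Int) (l : Int) (r : Int) score =
      pvOuterA rev ws (n : Int) (pvL rev.toList ws (r + 1) : Int) ((r + 1 : Nat) : Int)
        (max score ((r : Int) - (pvL rev.toList ws (r + 1) : Int) + 1)) := by
  by_cases hEq : l = pvL rev.toList ws (r + 1)
  · rw [hEq]
    exact pvOuterA_step_clean rev ws hw n r hrn score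
  · have hlt : l < pvL rev.toList ws (r + 1) := by omega
    have hlr1 : pvL rev.toList ws (r + 1) ≤ r + 1 := pvL_le rev.toList ws hw (r + 1)
    rw [pvOuterA]
    have hg : ¬ ((n : Int) ≤ (r : Int)) := by omega
    rw [if_neg hg]
    have hcl : ¬ pvNotIncl ws (PySem.Str.slice rev (some (l : Int)) (some ((r : Int) + 1))) = true := by
      rw [pv_cleanb_iff rev ws hw l r (by omega)]
      omega
    rw [if_neg hcl]
    have hg2 : ¬ ((r : Int) + 1 ≤ (l : Int)) := by omega
    rw [if_neg hg2]
    rw [pvInnerA_eq rev ws hw r _ l rfl (by omega)]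
    exact pvOuterA_step_clean rev ws hw n r hrn score

theorem pvOuterA_main (rev : String) (ws : List String) (hw : ∀ w ∈ ws, w.toList ≠ [])
    (n : Nat) : ∀ k r, n - r = k → r ≤ n →
      pvOuterA rev ws (n : Int) (pvL rev.toList ws r : Int) (r : Int) (pvRef rev.toList ws r : Int) =
        (pvRef rev.toList ws n : Int) := by
  intro k
  induction k with
  | zero =>
    intro r hk hrn
    have : r = n := by omega
    subst this
    rw [pvOuterA, if_pos (le_refl (r : Int))]
  | succ k ihk =>
    intro r hk hrn
    have hrn' : r < n := by omega
    rw [pvOuterA_step rev ws hw n r hrn' _ (pvL rev.toList ws r) (pvL_mono rev.toList ws r),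
      pv_max_cast]
    have hRef : max (pvRef rev.toList ws r) (r + 1 - pvL rev.toList ws (r + 1)) =
        pvRef rev.toList ws (r + 1) := rfl
    rw [hRef]
    exact ihk (r + 1) (by omega) (by omega)

-- ===== B-side lemmas =====
theorem pv_le_pvBnd (cs : List Char) (ws : List String) (r : Nat) (w : String)
    (hwm : w ∈ ws) (h1 : w.toList.length ≤ r + 1)
    (hp : w.toList <+: cs.drop (r + 1 - w.toList.length)) :
    r + 2 - w.toList.length ≤ pvBnd cs ws r := by
  have h2 := (pv_foldl_max_le_iff ws
      (fun w => w.toList.length ≤ r + 1 ∧ w.toList <+: cs.drop (r + 1 - w.toList.length))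
      (fun w => r + 2 - w.toList.length) 0 (pvBnd cs ws r)).1 (le_refl (pvBnd cs ws r))
  exact h2.2 w hwm ⟨h1, hp⟩

-- the slice of length Ln ending after position r, as a character list
theorem pv_sliceB_toList (rev : String) (r Ln : Nat) (hL : Ln ≤ r + 1) :
    (PySem.Str.slice rev (some ((r : Int) + 1 - (Ln : Int))) (some ((r : Int) + 1))).toList
      = (rev.toList.drop (r + 1 - Ln)).take Ln := by
  have hc1 : (r : Int) + 1 - (Ln : Int) = ((r + 1 - Ln : Nat) : Int) := by omega
  have hc2 : (r : Int) + 1 = ((r + 1 : Nat) : Int) := by omega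
  rw [hc1, hc2, PySem.Str.toList_slice, PySem.Chars.slice_eq_listSlice, PySem.List.slice_natCast]
  congr 1
  omega

-- B's per-position fold over the distinct word lengths advances pvL by one step
theorem pv_foldBlen_pvL (rev : String) (ws : List String) (r : Nat)
    (hr : r < rev.toList.length) :
    (PySem.List.sorted (PySem.Set.ofList (List.map PySem.Str.len (PySem.Set.ofList ws)))
        (fun x => x)).foldl (fun l L =>
      if L ≤ (r : Int) + 1 ∧
         PySem.Set.contains (PySem.Set.ofList ws)
           (PySem.Str.slice rev (some ((r : Int) + 1 - L)) (some ((r : Int) + 1))) = true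
      then max l ((r : Int) + 2 - L) else l) ((pvL rev.toList ws r : Nat) : Int)
    = ((pvL rev.toList ws (r + 1) : Nat) : Int) := by
  have hiff := fun (l : Int) => pv_foldl_max_le_iff
    (PySem.List.sorted (PySem.Set.ofList (List.map PySem.Str.len (PySem.Set.ofList ws)))
      (fun x => x))
    (fun L => L ≤ (r : Int) + 1 ∧
      PySem.Set.contains (PySem.Set.ofList ws)
        (PySem.Str.slice rev (some ((r : Int) + 1 - L)) (some ((r : Int) + 1))) = true)
    (fun L => (r : Int) + 2 - L)
    ((pvL rev.toList ws r : Nat) : Int) l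
  set F := (PySem.List.sorted (PySem.Set.ofList (List.map PySem.Str.len (PySem.Set.ofList ws)))
      (fun x => x)).foldl (fun l L =>
    if L ≤ (r : Int) + 1 ∧
       PySem.Set.contains (PySem.Set.ofList ws)
         (PySem.Str.slice rev (some ((r : Int) + 1 - L)) (some ((r : Int) + 1))) = true
    then max l ((r : Int) + 2 - L) else l) ((pvL rev.toList ws r : Nat) : Int) with hFdef
  apply le_antisymm
  · rw [hiff]
    refine ⟨by exact_mod_cast pvL_mono rev.toList ws r, ?_⟩
    rintro L hLmem ⟨hL1, hL2⟩
    rw [PySem.List.mem_sorted, PySem.Set.mem_ofList] at hLmem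
    rcases List.mem_map.1 hLmem with ⟨w0, _, hLw⟩
    have hL0 : 0 ≤ L := by rw [← hLw, PySem.Str.len_eq]; exact Int.natCast_nonneg _
    have hLcast : L = ((L.toNat : Nat) : Int) := by omega
    have hLn_le : L.toNat ≤ r + 1 := by omega
    have hmem : PySem.Str.slice rev (some ((r : Int) + 1 - L)) (some ((r : Int) + 1)) ∈ ws :=
      (PySem.Set.mem_ofList ws _).1 ((PySem.Set.contains_iff _ _).1 hL2)
    have htl : (PySem.Str.slice rev (some ((r : Int) + 1 - L)) (some ((r : Int) + 1))).toList
        = (rev.toList.drop (r + 1 - L.toNat)).take L.toNat := by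
      rw [hLcast]
      exact pv_sliceB_toList rev r L.toNat hLn_le
    have hlen : (PySem.Str.slice rev (some ((r : Int) + 1 - L)) (some ((r : Int) + 1))).toList.length
        = L.toNat := by
      rw [htl, List.length_take, List.length_drop]
      omega
    have hpre : (PySem.Str.slice rev (some ((r : Int) + 1 - L)) (some ((r : Int) + 1))).toList
        <+: rev.toList.drop (r + 1 - L.toNat) := by
      refine List.prefix_iff_eq_take.2 ?_
      rw [htl]
      rw [show (List.take L.toNat (rev.toList.drop (r + 1 - L.toNat))).length = L.toNat from by
        rw [List.length_take, List.length_drop]; omega]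
    have hge := pv_le_pvBnd rev.toList ws r _ hmem (by omega) (by rw [hlen]; exact hpre)
    rw [hlen] at hge
    have hmax : pvBnd rev.toList ws r ≤ pvL rev.toList ws (r + 1) := Nat.le_max_right _ _
    omega
  · rcases (hiff F).1 (le_refl F) with ⟨hinit, hmems⟩
    have h0F : (0 : Int) ≤ F := le_trans (by exact_mod_cast Nat.zero_le _) hinit
    have hBndle : ((pvBnd rev.toList ws r : Nat) : Int) ≤ F := by
      have hle : pvBnd rev.toList ws r ≤ F.toNat := by
        rw [pvBnd_le_iff]
        intro w hwm h1 hp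
        have hLmem : PySem.Str.len w ∈
            PySem.List.sorted (PySem.Set.ofList (List.map PySem.Str.len (PySem.Set.ofList ws)))
              (fun x => x) := by
          rw [PySem.List.mem_sorted, PySem.Set.mem_ofList]
          exact List.mem_map.2 ⟨w, (PySem.Set.mem_ofList ws w).2 hwm, rfl⟩
        have hslice : PySem.Str.slice rev (some ((r : Int) + 1 - PySem.Str.len w))
            (some ((r : Int) + 1)) = w := by
          apply String.ext_iff.2
          rw [PySem.Str.len_eq, pv_sliceB_toList rev r w.toList.length h1]
          exact (List.prefix_iff_eq_take.1 hp).symm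
        have hcond : PySem.Str.len w ≤ (r : Int) + 1 ∧
            PySem.Set.contains (PySem.Set.ofList ws)
              (PySem.Str.slice rev (some ((r : Int) + 1 - PySem.Str.len w))
                (some ((r : Int) + 1))) = true := by
          refine ⟨by rw [PySem.Str.len_eq]; exact_mod_cast h1.trans (by omega), ?_⟩
          rw [hslice]
          exact (PySem.Set.contains_iff _ _).2 ((PySem.Set.mem_ofList ws w).2 hwm)
        have hF := hmems _ hLmem hcond
        rw [PySem.Str.len_eq] at hF
        omega
      omega
    have hmaxEq : pvL rev.toList ws (r + 1) = max (pvL rev.toList ws r) (pvBnd rev.toList ws r) := rfl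
    rw [hmaxEq]
    omega

theorem pv_foldB_main (rev : String) (ws : List String) : ∀ n : Nat, n ≤ rev.toList.length →
    ((List.range n).map (Nat.cast : Nat → Int)).foldl (fun (st : Int × Int) r =>
      let l := (PySem.List.sorted (PySem.Set.ofList (List.map PySem.Str.len (PySem.Set.ofList ws)))
          (fun x => x)).foldl (fun l L =>
        if L ≤ r + 1 ∧
           PySem.Set.contains (PySem.Set.ofList ws)
             (PySem.Str.slice rev (some (r + 1 - L)) (some (r + 1))) = true
        then max l (r + 2 - L) else l) st.1
      (l, max st.2 (r - l + 1))) ((0 : Int), (0 : Int))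
    = ((pvL rev.toList ws n : Int), (pvRef rev.toList ws n : Int)) := by
  intro n
  induction n with
  | zero => intro _; rfl
  | succ n ih =>
    intro hn
    rw [List.range_succ, List.map_append, List.foldl_append, ih (by omega)]
    simp only [List.map_cons, List.map_nil, List.foldl_cons, List.foldl_nil]
    rw [pv_foldBlen_pvL rev ws n (by omega)]
    refine Prod.ext rfl ?_
    show max ((pvRef rev.toList ws n : Nat) : Int) ((n : Int) - _ + 1) = _
    rw [pv_max_cast]
    rfl

-- ===== assembly =====
theorem pv_A_eq (review : String) (ws : List String) (hw : ∀ w ∈ ws, w.toList ≠ []) :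
    find_review_score review ws =
      ((pvRef (PySem.Str.lower review).toList ws (PySem.Str.lower review).toList.length : Nat) : Int) := by
  rw [find_review_score]
  have hlen : PySem.Str.len (PySem.Str.lower review) =
      (((PySem.Str.lower review).toList.length : Nat) : Int) := PySem.Str.len_eq _
  simp only [hlen]
  have h0 : ((0 : Int)) = (((0 : Nat)) : Int) := rfl
  rw [show ((0 : Int)) = ((pvL (PySem.Str.lower review).toList ws 0 : Nat) : Int) from rfl]
  have := pvOuterA_main (PySem.Str.lower review) ws hw (PySem.Str.lower review).toList.length
    (PySem.Str.lower review).toList.length 0 rfl (Nat.zero_le _)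
  simpa using this

theorem pv_B_eq (review : String) (ws : List String) :
    find_review_score_alt review ws =
      ((pvRef (PySem.Str.lower review).toList ws (PySem.Str.lower review).toList.length : Nat) : Int) := by
  rw [find_review_score_alt]
  have hlen : PySem.Str.len (PySem.Str.lower review) =
      (((PySem.Str.lower review).toList.length : Nat) : Int) := PySem.Str.len_eq _
  simp only [hlen]
  rw [PySem.List.pyRange_zero_natCast, pv_foldB_main (PySem.Str.lower review) ws _ le_rfl]

-- ===== VERDICT (by name: the statement is the Claim_ definition above) =====
theorem find_review_score_spec : Claim_equal_find_review_score := by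
  intro review ws _ hpre
  unfold Spec_find_review_score
  rcases hpre with hrev | hw
  · subst hrev
    have hlen : PySem.Str.len (PySem.Str.lower "") = (0 : Int) := by
      rw [PySem.Str.len_eq]
      rfl
    have hA : find_review_score "" ws = 0 := by
      simp only [find_review_score, hlen]
      rw [pvOuterA]
      norm_num
    have hB : find_review_score_alt "" ws = 0 := by
      simp only [find_review_score_alt, hlen]
      rfl
    rw [hA, hB]
  · have hw' : ∀ w ∈ ws, w.toList ≠ [] := by
      intro w hwm h
      have hww : w = "" := String.toList_eq_nil_iff.1 h
      exact hw (hww ▸ hwm)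
    rw [pv_A_eq review ws hw', pv_B_eq review ws]
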